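-- pv_equiv track=rewrite | github.com/homo-iocus/Project-Euler | problem5.py | checkIfDivisibleUntil20
-- ===== SOURCE A (Python) =====
-- def checkIfDivisibleUntil20(n):
--     count = 0
--     for i in range(1, 21):
--         if n % i == 0:
--             count = count + 1
--         else:
--             return False
--             break
--     if count == 20:
--         return True
-- ===== SOURCE B (Python) =====
-- def checkIfDivisibleUntil20(n):
--     # lcm(1..20) = 232792560; n is divisible by all of 1..20 iff by their lcm
--     return n % 232792560 == 0
-- ===== Notes on version B (the rewrite author's own statement) =====
-- stated objective: simpler
-- what changed: Replaces the 20-iteration loop with a counter by a single modulo test against lcm(1..20)=232792560.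
import Mathlib
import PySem

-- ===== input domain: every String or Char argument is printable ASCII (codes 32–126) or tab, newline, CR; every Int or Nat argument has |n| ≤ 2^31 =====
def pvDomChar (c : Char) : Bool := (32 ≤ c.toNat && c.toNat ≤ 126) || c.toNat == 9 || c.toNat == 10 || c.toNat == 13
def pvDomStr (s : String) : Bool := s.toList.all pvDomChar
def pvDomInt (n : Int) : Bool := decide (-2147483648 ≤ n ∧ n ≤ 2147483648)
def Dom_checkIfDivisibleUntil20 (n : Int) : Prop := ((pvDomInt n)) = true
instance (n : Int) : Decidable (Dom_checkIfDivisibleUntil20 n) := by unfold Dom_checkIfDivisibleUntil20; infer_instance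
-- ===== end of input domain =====

-- B replaces A's 20-step loop-and-counter by one modulo test against lcm(1..20); simpler, same results.
-- ===== PORT A =====
-- loop over range(1,21): count divisors, early-return False on a miss; after the loop, True iff count == 20
def chkLoopA (n : Int) (count : Int) : List Int → Option Bool
  | [] => if count == 20 then some true else none
  | i :: rest => if PySem.Int.mod n i == 0 then chkLoopA n (count + 1) rest else some false

def checkIfDivisibleUntil20 (n : Int) : Option Bool :=
  chkLoopA n 0 (PySem.List.pyRange 1 21 1)

-- ===== PORT B =====
def checkIfDivisibleUntil20_alt (n : Int) : Option Bool :=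
  some (PySem.Int.mod n 232792560 == 0)

-- ===== PRECONDITION & SPEC =====
def Spec_checkIfDivisibleUntil20 (n : Int) (out : Option Bool) : Prop := out = checkIfDivisibleUntil20_alt n
instance (n : Int) (out : Option Bool) : Decidable (Spec_checkIfDivisibleUntil20 n out) := by unfold Spec_checkIfDivisibleUntil20; infer_instance

-- ===== CLAIM (what is proved, stated in full; the proofs are below) =====
def Claim_equal_checkIfDivisibleUntil20 : Prop := ∀ (n : Int), Dom_checkIfDivisibleUntil20 n → Spec_checkIfDivisibleUntil20 n (checkIfDivisibleUntil20 n)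

-- ===== LEMMAS AND PROOFS =====

-- ===== VERDICT (by name: the statement is the Claim_ definition above) =====
theorem range_val : PySem.List.pyRange 1 21 1 = [1,2,3,4,5,6,7,8,9,10,11,12,13,14,15,16,17,18,19,20] := by decide

-- if every i in 1..20 divides n then lcm(1..20) divides n (via pairwise-coprime factors 16,9,5,7,11,13,17,19)
theorem lcm_dvd_of_all (n : Int)
    (h16 : (16:Int) ∣ n) (h9 : (9:Int) ∣ n) (h5 : (5:Int) ∣ n) (h7 : (7:Int) ∣ n)
    (h11 : (11:Int) ∣ n) (h13 : (13:Int) ∣ n) (h17 : (17:Int) ∣ n) (h19 : (19:Int) ∣ n) :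
    (232792560 : Int) ∣ n := by
  have c1 : IsCoprime (16:Int) 9 := by
    rw [Int.isCoprime_iff_gcd_eq_one]; decide
  have d1 : (144:Int) ∣ n := by simpa using c1.mul_dvd h16 h9
  have c2 : IsCoprime (144:Int) 5 := by rw [Int.isCoprime_iff_gcd_eq_one]; decide
  have d2 : (720:Int) ∣ n := by simpa using c2.mul_dvd d1 h5
  have c3 : IsCoprime (720:Int) 7 := by rw [Int.isCoprime_iff_gcd_eq_one]; decide
  have d3 : (5040:Int) ∣ n := by simpa using c3.mul_dvd d2 h7
  have c4 : IsCoprime (5040:Int) 11 := by rw [Int.isCoprime_iff_gcd_eq_one]; decide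
  have d4 : (55440:Int) ∣ n := by simpa using c4.mul_dvd d3 h11
  have c5 : IsCoprime (55440:Int) 13 := by rw [Int.isCoprime_iff_gcd_eq_one]; decide
  have d5 : (720720:Int) ∣ n := by simpa using c5.mul_dvd d4 h13
  have c6 : IsCoprime (720720:Int) 17 := by rw [Int.isCoprime_iff_gcd_eq_one]; decide
  have d6 : (12252240:Int) ∣ n := by simpa using c6.mul_dvd d5 h17
  have c7 : IsCoprime (12252240:Int) 19 := by rw [Int.isCoprime_iff_gcd_eq_one]; decide
  have d7 : (232792560:Int) ∣ n := by simpa using c7.mul_dvd d6 h19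
  exact d7

theorem mod_zero_iff (n i : Int) : (PySem.Int.mod n i == 0) = true ↔ i ∣ n := by
  simp [PySem.Int.mod_eq_zero_iff_dvd]

theorem checkIfDivisibleUntil20_spec : Claim_equal_checkIfDivisibleUntil20 := by
  intro n _
  unfold Spec_checkIfDivisibleUntil20
  show chkLoopA n 0 (PySem.List.pyRange 1 21 1) = some (PySem.Int.mod n 232792560 == 0)
  rw [range_val]
  by_cases hL : (232792560 : Int) ∣ n
  · have hall : ∀ i : Int, i ∣ (232792560:Int) → (PySem.Int.mod n i == 0) = true := by
      intro i hi; exact (mod_zero_iff n i).mpr (dvd_trans hi hL)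
    have hmod : (PySem.Int.mod n 232792560 == 0) = true := (mod_zero_iff n _).mpr hL
    simp only [chkLoopA,
      hall 1 (by decide), hall 2 (by decide), hall 3 (by decide), hall 4 (by decide),
      hall 5 (by decide), hall 6 (by decide), hall 7 (by decide), hall 8 (by decide),
      hall 9 (by decide), hall 10 (by decide), hall 11 (by decide), hall 12 (by decide),
      hall 13 (by decide), hall 14 (by decide), hall 15 (by decide), hall 16 (by decide),
      hall 17 (by decide), hall 18 (by decide), hall 19 (by decide), hall 20 (by decide),
      if_true, hmod]
    norm_num
  · have hmod : (PySem.Int.mod n 232792560 == 0) = false := by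
      rw [Bool.eq_false_iff]; intro h; exact hL ((mod_zero_iff n _).mp h)
    rw [hmod]
    -- some i in 1..20 fails; peel the loop, splitting on each test
    have key : ∃ i : Int, i ∈ ([1,2,3,4,5,6,7,8,9,10,11,12,13,14,15,16,17,18,19,20] : List Int) ∧ ¬ i ∣ n := by
      by_contra hc
      push Not at hc
      exact hL (lcm_dvd_of_all n (hc 16 (by decide)) (hc 9 (by decide)) (hc 5 (by decide))
        (hc 7 (by decide)) (hc 11 (by decide)) (hc 13 (by decide)) (hc 17 (by decide)) (hc 19 (by decide)))
    -- loop returns some false whenever some remaining element fails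
    clear hmod hL
    obtain ⟨i, hi, hnd⟩ := key
    have gen : ∀ (l : List Int) (c : Int), (∃ j ∈ l, ¬ j ∣ n) → chkLoopA n c l = some false := by
      intro l
      induction l with
      | nil => intro c h; simp at h
      | cons a t ih =>
        intro c h
        by_cases ha : (PySem.Int.mod n a == 0) = true
        · have had : a ∣ n := (mod_zero_iff n a).mp ha
          simp only [chkLoopA, ha, if_true]
          apply ih
          rcases h with ⟨j, hj, hjd⟩
          rcases List.mem_cons.mp hj with rfl | hmem
          · exact absurd had hjd
          · exact ⟨j, hmem, hjd⟩
        · simp only [chkLoopA, ha]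
          simp
    exact gen _ 0 ⟨i, hi, hnd⟩
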